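-- pv_equiv track=rewrite | github.com/AntonioHRichter/AOC | 2015/2015_11/AOC_2015_11.py | removeCharFromFirsRule
-- ===== SOURCE A (Python) =====
-- def removeCharFromFirsRule(p, pos):
--     if pos == len(p) -1:
--         return p
--     if p[pos] in ('l', 'i', 'o'):
--         p[pos] = chr(ord(p[pos]) + 1)
--         p[pos+1:] = 'a'*(len(p)-pos-1)
--         return p
--     return removeCharFromFirsRule(p, pos+1)
-- ===== SOURCE B (Python) =====
-- _FORBIDDEN = frozenset(('l', 'i', 'o'))
--
--
-- def _firstForbidden(p, pos):
--     """Index (as given, possibly negative) of the first forbidden entry at or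
--     after pos, scanning positions pos, pos+1, ... and stopping before the last
--     position; None if the scan reaches len(p)-1 without a hit."""
--     while pos != len(p) - 1:
--         if p[pos] in _FORBIDDEN:
--             return pos
--         pos += 1
--     return None
--
--
-- def removeCharFromFirsRule(p, pos):
--     i = _firstForbidden(p, pos)
--     if i is None:
--         return p
--     p[i] = chr(ord(p[i]) + 1)
--     p[i + 1:] = 'a' * (len(p) - i - 1)
--     return p
-- ===== Notes on version B (the rewrite author's own statement) =====
-- stated objective: simpler
-- what changed: The tail recursion interleaved with mutation is replaced by a two-phase decomposition: an iterative pure scan that locates the first forbidden entry, then a single edit step applied once to that index.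
import Mathlib
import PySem

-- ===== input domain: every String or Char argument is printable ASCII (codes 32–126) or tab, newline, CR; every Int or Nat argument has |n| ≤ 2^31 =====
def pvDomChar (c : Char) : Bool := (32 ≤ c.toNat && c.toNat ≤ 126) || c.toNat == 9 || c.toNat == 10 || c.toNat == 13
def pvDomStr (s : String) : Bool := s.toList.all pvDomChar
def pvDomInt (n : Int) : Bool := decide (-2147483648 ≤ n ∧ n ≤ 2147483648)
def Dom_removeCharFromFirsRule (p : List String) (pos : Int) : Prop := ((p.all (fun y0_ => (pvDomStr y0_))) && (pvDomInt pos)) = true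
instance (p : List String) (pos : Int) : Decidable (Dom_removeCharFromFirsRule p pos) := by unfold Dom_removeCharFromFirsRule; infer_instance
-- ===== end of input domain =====

-- B replaces A's mutating tail recursion by a pure iterative scan followed by one edit step;
-- both mutate p in place identically in Python, and the equivalence here is about the return value.

-- chr(ord(s)+1) for a one-character string (exact there; only ever applied to 'l'/'i'/'o')
def pvChrOrdSucc (s : String) : String :=
  match s.toList with
  | [c] => String.ofList [Char.ofNat (c.toNat + 1)]
  | _ => s

-- ===== PORT A =====
def removeCharFromFirsRule (p : List String) (pos : Int) : List String :=
  if pos = (p.length : Int) - 1 then p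
  else
    match h : PySem.List.pyGet? p pos with
    | none => p   -- IndexError in Python (outside Pre_)
    | some c =>
      if c = "l" ∨ c = "i" ∨ c = "o" then
        let p1 := PySem.List.pySetD p pos (pvChrOrdSucc c)
        PySem.List.slice p1 none (some (pos + 1)) ++
          List.replicate ((p1.length : Int) - pos - 1).toNat "a"
      else removeCharFromFirsRule p (pos + 1)
termination_by ((p.length : Int) - pos).toNat
decreasing_by
  have hin : PySem.Raise.InRange p.length pos := by
    by_contra hc
    rw [← PySem.List.pyGet?_eq_none_iff (xs := p) (i := pos)] at hc
    simp [hc] at h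
  unfold PySem.Raise.InRange at hin
  omega

-- ===== PORT B =====
def pvFirstForbidden (p : List String) (pos : Int) : Option Int :=
  if pos = (p.length : Int) - 1 then none
  else if hin : -(p.length : Int) ≤ pos ∧ pos < (p.length : Int) then
    -- in-range guard for p[pos]: Python raises IndexError outside it (outside Pre_)
    if PySem.List.pyGetD p pos "" ∈ (["l", "i", "o"] : List String) then some pos
    else pvFirstForbidden p (pos + 1)
  else none
termination_by ((p.length : Int) - pos).toNat
decreasing_by omega

def removeCharFromFirsRule_alt (p : List String) (pos : Int) : List String :=
  match pvFirstForbidden p pos with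
  | none => p
  | some i =>
    let p1 := PySem.List.pySetD p i (pvChrOrdSucc (PySem.List.pyGetD p i ""))
    PySem.List.slice p1 none (some (i + 1)) ++
      List.replicate ((p1.length : Int) - i - 1).toNat "a"

-- ===== PRECONDITION & SPEC =====
-- Pre_ excludes exactly the inputs on which the Python A raises IndexError
-- (a start position outside [-len(p), len(p)-1], except pos = len(p)-1 itself).
def Pre_removeCharFromFirsRule (p : List String) (pos : Int) : Prop :=
  (-(p.length : Int) ≤ pos ∧ pos ≤ (p.length : Int) - 1) ∨ pos = (p.length : Int) - 1
instance (p : List String) (pos : Int) : Decidable (Pre_removeCharFromFirsRule p pos) := by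
  unfold Pre_removeCharFromFirsRule; infer_instance

def pvWitness_removeCharFromFirsRule : List String × Int := (["a", "l", "c"], 0)

def Spec_removeCharFromFirsRule (p : List String) (pos : Int) (out : List String) : Prop :=
  out = removeCharFromFirsRule_alt p pos
instance (p : List String) (pos : Int) (out : List String) :
    Decidable (Spec_removeCharFromFirsRule p pos out) := by
  unfold Spec_removeCharFromFirsRule; infer_instance

-- ===== CLAIM (what is proved, stated in full; the proofs are below) =====
def Claim_equal_removeCharFromFirsRule : Prop :=
  ∀ (p : List String) (pos : Int), Dom_removeCharFromFirsRule p pos →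
    Pre_removeCharFromFirsRule p pos →
    Spec_removeCharFromFirsRule p pos (removeCharFromFirsRule p pos)

-- ===== LEMMAS AND PROOFS =====

theorem pyGetD_of_pyGet?_some {α : Type} {xs : List α} {i : Int} {c d : α}
    (h : PySem.List.pyGet? xs i = some c) : PySem.List.pyGetD xs i d = c := by
  simp [PySem.List.pyGetD, h]

theorem removeCharFromFirsRule_eq_alt (p : List String) (pos : Int) :
    removeCharFromFirsRule p pos = removeCharFromFirsRule_alt p pos := by
  fun_induction removeCharFromFirsRule p pos with
  | case1 =>
    rw [removeCharFromFirsRule_alt]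
    conv_rhs => rw [pvFirstForbidden]
    simp
  | case2 x hb h =>
    have hnin := (PySem.List.pyGet?_eq_none_iff (xs := p) (i := x)).mp h
    unfold PySem.Raise.InRange at hnin
    rw [removeCharFromFirsRule_alt]
    conv_rhs => rw [pvFirstForbidden]
    rw [if_neg hb, dif_neg (by omega)]
  | case3 x hb c h hc hp1 =>
    have hmem : c ∈ (["l", "i", "o"] : List String) := by simpa using hc
    have hin : PySem.Raise.InRange p.length x := by
      by_contra hcon
      rw [← PySem.List.pyGet?_eq_none_iff (xs := p) (i := x)] at hcon
      simp [hcon] at h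
    unfold PySem.Raise.InRange at hin
    rw [removeCharFromFirsRule_alt]
    conv_rhs => rw [pvFirstForbidden]
    rw [if_neg hb, dif_pos (by omega), pyGetD_of_pyGet?_some (d := "") h, if_pos hmem]
    simp only [hp1, PySem.List.length_pySetD, pyGetD_of_pyGet?_some (d := "") h]
  | case4 x hb c h hc ih =>
    have hmem : c ∉ (["l", "i", "o"] : List String) := by simpa using hc
    have hin : PySem.Raise.InRange p.length x := by
      by_contra hcon
      rw [← PySem.List.pyGet?_eq_none_iff (xs := p) (i := x)] at hcon
      simp [hcon] at h
    unfold PySem.Raise.InRange at hin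
    rw [ih, removeCharFromFirsRule_alt, removeCharFromFirsRule_alt]
    conv_rhs => rw [pvFirstForbidden]
    rw [if_neg hb, dif_pos (by omega), pyGetD_of_pyGet?_some (d := "") h, if_neg hmem]

-- ===== VERDICT (by name: the statement is the Claim_ definition above) =====
theorem removeCharFromFirsRule_spec : Claim_equal_removeCharFromFirsRule := by
  intro p pos _ _
  unfold Spec_removeCharFromFirsRule
  exact removeCharFromFirsRule_eq_alt p pos
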